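-- pv_equiv track=rewrite | github.com/Rafat-Pantho/DS-LAB-4304 | LAB 13/220041102_T02L13_1B.py | build_sparse_table
-- ===== SOURCE A (Python) =====
-- import math
--
-- def build_sparse_table(arr,n):
--     log = math.floor(math.log2(n))+1
--     st = [[0]*log for i in range(n)]
--     for i in range(n):
--         st[i][0] = arr[i]
--     j = 1
--     while j<log:
--         i=0
--         while i+(1<<j)-1<n:
--             st[i][j] = min(st[i][j-1],st[i +(1<<(j-1))][j-1])
--             i+=1
--         j+=1
--     return st,log
-- ===== SOURCE B (Python) =====
-- import math
--
--
-- def build_sparse_table(arr, n):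
--     log = math.floor(math.log2(n)) + 1
--     st = [[min(arr[i:i + (1 << j)]) if i + (1 << j) <= n else 0
--            for j in range(log)]
--           for i in range(n)]
--     return st, log
-- ===== Notes on version B (the rewrite author's own statement) =====
-- stated objective: simpler
-- what changed: Replaces the in-place doubling DP (st[i][j] from two column j-1 entries) by a single pure comprehension that fills each used entry directly as min(arr[i:i+2^j]), with no table mutation and no inter-column recurrence.
import Mathlib
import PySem

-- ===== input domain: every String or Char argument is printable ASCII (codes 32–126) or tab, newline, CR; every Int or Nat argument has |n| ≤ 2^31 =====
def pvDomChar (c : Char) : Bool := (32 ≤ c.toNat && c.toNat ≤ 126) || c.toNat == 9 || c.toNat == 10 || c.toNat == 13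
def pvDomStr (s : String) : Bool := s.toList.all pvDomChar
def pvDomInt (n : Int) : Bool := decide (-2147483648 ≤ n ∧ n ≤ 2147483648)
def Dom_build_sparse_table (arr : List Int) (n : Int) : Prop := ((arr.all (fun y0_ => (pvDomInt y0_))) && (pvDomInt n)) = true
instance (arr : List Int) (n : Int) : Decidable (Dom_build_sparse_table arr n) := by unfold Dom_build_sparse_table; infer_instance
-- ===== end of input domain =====

-- B replaces A's in-place doubling DP by a pure comprehension computing each used entry
-- directly as the minimum of its window of the raw array (objective: simpler).

-- ===== PORT A =====
-- st[i][k] read / write on the nested-list table (Python st[i][k] and st[i][k] = v)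
def pvGet2 (st : List (List Int)) (i k : Nat) : Int := (st.getD i []).getD k 0
def pvSet2 (st : List (List Int)) (i k : Nat) (v : Int) : List (List Int) :=
  st.set i ((st.getD i []).set k v)

def build_sparse_table (arr : List Int) (n : Int) : List (List Int) × Int :=
  let nn := n.toNat
  -- math.floor(math.log2(n)) + 1: for 1 ≤ n ≤ 2^31 (Pre_ ∧ Dom) this is n.bit_length = Nat.log2 n + 1
  let log := Nat.log2 nn + 1
  let st0 := (List.range nn).map (fun _ => List.replicate log (0 : Int))
  -- for i in range(n): st[i][0] = arr[i]   (arr[i] in range under Pre_, so getD is exact)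
  let st1 := (List.range nn).foldl (fun st i => pvSet2 st i 0 (arr.getD i 0)) st0
  -- while j < log (j = 1,2,…); inner while i+(1<<j)-1 < n runs for i = 0 … n - 2^j
  let st2 := (List.range (log - 1)).foldl (fun st j1 =>
      let j := j1 + 1
      (List.range (nn + 1 - 2 ^ j)).foldl (fun st i =>
        pvSet2 st i j (min (pvGet2 st i (j - 1)) (pvGet2 st (i + 2 ^ (j - 1)) (j - 1)))) st) st1
  (st2, (log : Int))

-- ===== PORT B =====
def build_sparse_table_alt (arr : List Int) (n : Int) : List (List Int) × Int :=
  let nn := n.toNat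
  let log := Nat.log2 nn + 1
  -- min(arr[i:i+(1<<j)]) if i + (1<<j) <= n else 0  (the window is nonempty under Pre_, so getD 0 is never the result)
  let st := (List.range nn).map (fun (i : Nat) =>
    (List.range log).map (fun (j : Nat) =>
      if (i : Int) + 2 ^ j ≤ n then
        ((PySem.List.min? (PySem.List.slice arr (some (i : Int)) (some ((i : Int) + 2 ^ j))) (fun x => x)).getD 0)
      else 0))
  (st, (log : Int))

-- ===== PRECONDITION & SPEC =====
-- Pre_ excludes exactly the inputs where A raises: n < 1 (math.log2 ValueError) and n > len(arr) (IndexError in the fill loop).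
def Pre_build_sparse_table (arr : List Int) (n : Int) : Prop := 1 ≤ n ∧ n ≤ arr.length
instance (arr : List Int) (n : Int) : Decidable (Pre_build_sparse_table arr n) := by
  unfold Pre_build_sparse_table; infer_instance
def pvWitness_build_sparse_table : List Int × Int := ([5, 3, 8, 1], 3)

def Spec_build_sparse_table (arr : List Int) (n : Int) (out : List (List Int) × Int) : Prop := out = build_sparse_table_alt arr n
instance (arr : List Int) (n : Int) (out : List (List Int) × Int) : Decidable (Spec_build_sparse_table arr n out) := by unfold Spec_build_sparse_table; infer_instance

-- ===== CLAIM (what is proved, stated in full; the proofs are below) =====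
def Claim_equal_build_sparse_table : Prop := ∀ (arr : List Int) (n : Int), Dom_build_sparse_table arr n → Pre_build_sparse_table arr n → Spec_build_sparse_table arr n (build_sparse_table arr n)

-- ===== LEMMAS AND PROOFS =====

-- min of a nonempty list as Python's min loop; 0 for []
def wmin (xs : List Int) : Int :=
  match xs with
  | [] => 0
  | x :: t => t.foldl min x

-- the minimum of the window arr[i : i+len]
def wm (arr : List Int) (i len : Nat) : Int := wmin ((arr.drop i).take len)

-- the intended value of entry (i,k) after passes 1..j of A have run
def Etab (arr : List Int) (nn log j i k : Nat) : Int :=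
  if i < nn ∧ k < log then
    (if k ≤ j ∧ i + 2 ^ k ≤ nn then wm arr i (2 ^ k) else 0)
  else 0

def pvInv (arr : List Int) (nn log j : Nat) (st : List (List Int)) : Prop :=
  st.length = nn ∧ (∀ i, (st.getD i []).length = if i < nn then log else 0) ∧
  ∀ i k, pvGet2 st i k = Etab arr nn log j i k

theorem foldl_min_ne_nil (t : List Int) (s : Int) (h : t ≠ []) :
    t.foldl min s = min s (wmin t) := by
  match t with
  | [] => exact absurd rfl h
  | x :: u =>
    show (x :: u).foldl min s = min s (u.foldl min x)
    rw [List.foldl_cons, List.foldl_assoc]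

theorem wmin_append (a b : List Int) (ha : a ≠ []) (hb : b ≠ []) :
    wmin (a ++ b) = min (wmin a) (wmin b) := by
  match a with
  | [] => exact absurd rfl ha
  | x :: t =>
    show wmin ((x :: t) ++ b) = min (wmin (x :: t)) (wmin b)
    show (t ++ b).foldl min x = min (t.foldl min x) (wmin b)
    rw [List.foldl_append, foldl_min_ne_nil b _ hb]

theorem min?_id_getD (xs : List Int) :
    (PySem.List.min? xs (fun x => x)).getD 0 = wmin xs := by
  match xs with
  | [] => rfl
  | x :: t => rw [PySem.List.min?_id_cons]; rfl

theorem wm_one (arr : List Int) (i : Nat) (h : i < arr.length) :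
    wm arr i 1 = arr.getD i 0 := by
  have hd : (arr.drop i).take 1 = [arr.getD i 0] := by
    rw [List.drop_eq_getElem_cons h, List.take_succ_cons, List.take_zero,
      List.getD_eq_getElem _ _ h]
  unfold wm
  rw [hd]; rfl

theorem wm_rec (arr : List Int) (i p : Nat) (h : i + 2 ^ (p + 1) ≤ arr.length) :
    wm arr i (2 ^ (p + 1)) = min (wm arr i (2 ^ p)) (wm arr (i + 2 ^ p) (2 ^ p)) := by
  have h2 : 0 < 2 ^ p := Nat.two_pow_pos p
  have hsplit : (arr.drop i).take (2 ^ (p + 1)) =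
      (arr.drop i).take (2 ^ p) ++ (arr.drop (i + 2 ^ p)).take (2 ^ p) := by
    rw [show 2 ^ (p + 1) = 2 ^ p + 2 ^ p by ring, List.take_add, List.drop_drop]
  unfold wm
  rw [hsplit, wmin_append]
  · apply List.ne_nil_of_length_pos
    simp only [List.length_take, List.length_drop]
    omega
  · apply List.ne_nil_of_length_pos
    simp only [List.length_take, List.length_drop]
    omega

theorem length_pvSet2 (st : List (List Int)) (i k : Nat) (v : Int) :
    (pvSet2 st i k v).length = st.length := List.length_set ..

theorem row_pvSet2_length (st : List (List Int)) (i k : Nat) (v : Int) (i' : Nat) :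
    ((pvSet2 st i k v).getD i' []).length = (st.getD i' []).length := by
  by_cases h : i' = i
  · subst h
    by_cases hl : i' < st.length
    · unfold pvSet2
      rw [List.getD_eq_getElem _ _ (by simpa using hl), List.getElem_set_self,
        List.length_set, List.getD_eq_getElem _ _ hl]
    · unfold pvSet2
      rw [List.set_eq_of_length_le (by omega)]
  · unfold pvSet2 List.getD
    rw [List.getElem?_set_ne (by omega)]

theorem pvGet2_pvSet2 (st : List (List Int)) (i k : Nat) (v : Int) (i' k' : Nat) :
    pvGet2 (pvSet2 st i k v) i' k' =
      if i' = i ∧ k' = k ∧ i < st.length ∧ k < (st.getD i []).length then v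
      else pvGet2 st i' k' := by
  by_cases hii : i' = i
  · subst hii
    by_cases hl : i' < st.length
    · have hrow : st.getD i' [] = st[i'] := List.getD_eq_getElem _ _ hl
      simp only [pvGet2, pvSet2, List.getD, List.getElem?_set_self']
      rw [List.getElem?_eq_getElem hl]
      simp only [Option.getD_some]
      by_cases hkk : k' = k
      · subst hkk
        by_cases hk : k' < st[i'].length
        · simp [hk, hl]
        · simp [hk, hl]
      · simp [hkk, Ne.symm hkk]
    · have hno : pvSet2 st i' k v = st := by
        unfold pvSet2; exact List.set_eq_of_length_le (by omega)
      rw [hno, if_neg (by omega)]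
  · simp only [pvGet2, pvSet2, List.getD]
    rw [List.getElem?_set_ne (by omega)]
    rw [if_neg (by tauto)]

theorem base_inv (arr : List Int) (nn log : Nat) (hlen : nn ≤ arr.length)
    (m : Nat) (hm : m ≤ nn) :
    ((List.range m).foldl (fun st i => pvSet2 st i 0 (arr.getD i 0))
        ((List.range nn).map (fun _ => List.replicate log (0 : Int)))).length = nn ∧
    (∀ i, (((List.range m).foldl (fun st i => pvSet2 st i 0 (arr.getD i 0))
        ((List.range nn).map (fun _ => List.replicate log (0 : Int)))).getD i []).length
        = if i < nn then log else 0) ∧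
    ∀ i k, pvGet2 ((List.range m).foldl (fun st i => pvSet2 st i 0 (arr.getD i 0))
        ((List.range nn).map (fun _ => List.replicate log (0 : Int)))) i k =
      if i < m ∧ k = 0 ∧ k < log then wm arr i 1 else 0 := by
  induction m with
  | zero =>
    refine ⟨?_, fun i => ?_, fun i k => ?_⟩ <;>
      simp only [List.range_zero, List.foldl_nil]
    · simp
    · simp only [List.map_const', List.length_range, List.getD, List.getElem?_replicate]
      split_ifs <;> simp
    · simp only [List.map_const', List.length_range, pvGet2, List.getD,
        List.getElem?_replicate]
      rw [if_neg (show ¬(i < 0 ∧ k = 0 ∧ k < log) by omega)]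
      split_ifs <;> simp
  | succ m ih =>
    obtain ⟨ihL, ihR, ihE⟩ := ih (by omega)
    rw [List.range_succ, List.foldl_append, List.foldl_cons, List.foldl_nil]
    refine ⟨by rw [length_pvSet2, ihL], fun i => by rw [row_pvSet2_length, ihR i],
      fun i k => ?_⟩
    rw [pvGet2_pvSet2, ihL, ihR m]
    by_cases hz : 0 < log
    · rw [ihE i k]
      by_cases hik : i = m ∧ k = 0
      · obtain ⟨hi, hk⟩ := hik
        subst hi; subst hk
        rw [if_pos ⟨rfl, rfl, by omega, by split_ifs <;> omega⟩,
          if_pos ⟨by omega, rfl, hz⟩, wm_one arr i (by omega)]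
      · rw [if_neg (by tauto)]
        by_cases h1 : i < m ∧ k = 0 ∧ k < log
        · rw [if_pos h1, if_pos ⟨by omega, h1.2⟩]
        · rw [if_neg h1, if_neg (by rintro ⟨a, b, c⟩; exact h1 ⟨by omega, b, c⟩)]
    · rw [if_neg (by
          rintro ⟨-, -, -, h4⟩
          rw [if_pos (show m < nn by omega)] at h4
          omega), ihE i k, if_neg (by omega), if_neg (by omega)]

theorem inner_inv (arr : List Int) (nn log j : Nat) (st : List (List Int))
    (hlen : nn ≤ arr.length) (hp : j + 1 < log)
    (hL : st.length = nn) (hR : ∀ i, (st.getD i []).length = if i < nn then log else 0)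
    (hE : ∀ i k, pvGet2 st i k = Etab arr nn log j i k)
    (m : Nat) (hm : m ≤ nn + 1 - 2 ^ (j + 1)) :
    ((List.range m).foldl (fun st i =>
        pvSet2 st i (j + 1) (min (pvGet2 st i j) (pvGet2 st (i + 2 ^ j) j))) st).length = nn ∧
    (∀ i, (((List.range m).foldl (fun st i =>
        pvSet2 st i (j + 1) (min (pvGet2 st i j) (pvGet2 st (i + 2 ^ j) j))) st).getD i []).length
        = if i < nn then log else 0) ∧
    ∀ i k, pvGet2 ((List.range m).foldl (fun st i =>
        pvSet2 st i (j + 1) (min (pvGet2 st i j) (pvGet2 st (i + 2 ^ j) j))) st) i k =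
      if i < m ∧ k = j + 1 then wm arr i (2 ^ (j + 1)) else Etab arr nn log j i k := by
  have h2 : 0 < 2 ^ j := Nat.two_pow_pos j
  have h2' : 2 ^ (j + 1) = 2 ^ j + 2 ^ j := by ring
  induction m with
  | zero =>
    refine ⟨hL, hR, fun i k => ?_⟩
    simp only [List.range_zero, List.foldl_nil]
    rw [if_neg (by omega)]
    exact hE i k
  | succ m ih =>
    obtain ⟨ihL, ihR, ihE⟩ := ih (by omega)
    have hmn : m + 2 ^ (j + 1) ≤ nn := by omega
    rw [List.range_succ, List.foldl_append, List.foldl_cons, List.foldl_nil]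
    refine ⟨by rw [length_pvSet2, ihL], fun i => by rw [row_pvSet2_length, ihR i],
      fun i k => ?_⟩
    have hv1 : pvGet2 ((List.range m).foldl (fun st i =>
        pvSet2 st i (j + 1) (min (pvGet2 st i j) (pvGet2 st (i + 2 ^ j) j))) st) m j
        = wm arr m (2 ^ j) := by
      rw [ihE m j, if_neg (by omega)]
      unfold Etab
      rw [if_pos ⟨by omega, by omega⟩, if_pos ⟨le_refl j, by omega⟩]
    have hv2 : pvGet2 ((List.range m).foldl (fun st i =>
        pvSet2 st i (j + 1) (min (pvGet2 st i j) (pvGet2 st (i + 2 ^ j) j))) st) (m + 2 ^ j) j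
        = wm arr (m + 2 ^ j) (2 ^ j) := by
      rw [ihE (m + 2 ^ j) j, if_neg (by omega)]
      unfold Etab
      rw [if_pos ⟨by omega, by omega⟩, if_pos ⟨le_refl j, by omega⟩]
    rw [pvGet2_pvSet2, ihL, ihR m, hv1, hv2, ← wm_rec arr m j (by omega)]
    by_cases hik : i = m ∧ k = j + 1
    · obtain ⟨hi, hk⟩ := hik
      subst hi; subst hk
      rw [if_pos ⟨rfl, rfl, by omega, by rw [if_pos (by omega)]; omega⟩,
        if_pos ⟨by omega, rfl⟩]
    · rw [if_neg (by tauto), ihE i k]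
      by_cases h1 : i < m ∧ k = j + 1
      · rw [if_pos h1, if_pos ⟨by omega, h1.2⟩]
      · rw [if_neg h1, if_neg (by rintro ⟨a, b⟩; exact h1 ⟨by omega, b⟩)]

theorem outer_inv (arr : List Int) (nn log : Nat) (st1 : List (List Int))
    (hlen : nn ≤ arr.length) (h0 : pvInv arr nn log 0 st1)
    (m : Nat) (hm : m ≤ log - 1) :
    pvInv arr nn log m ((List.range m).foldl (fun st j1 =>
      (List.range (nn + 1 - 2 ^ (j1 + 1))).foldl (fun st i =>
        pvSet2 st i (j1 + 1) (min (pvGet2 st i j1) (pvGet2 st (i + 2 ^ j1) j1))) st) st1) := by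
  induction m with
  | zero =>
    simp only [List.range_zero, List.foldl_nil]
    exact h0
  | succ m ih =>
    obtain ⟨ihL, ihR, ihE⟩ := ih (by omega)
    rw [List.range_succ, List.foldl_append, List.foldl_cons, List.foldl_nil]
    obtain ⟨L2, R2, E2⟩ := inner_inv arr nn log m _ hlen (by omega) ihL ihR ihE
      (nn + 1 - 2 ^ (m + 1)) (le_refl _)
    refine ⟨L2, R2, fun i k => ?_⟩
    rw [E2 i k]
    unfold Etab
    have h2 : 0 < 2 ^ (m + 1) := Nat.two_pow_pos (m + 1)
    by_cases hk : k = m + 1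
    · subst hk
      by_cases hi1 : i < nn + 1 - 2 ^ (m + 1)
      · rw [if_pos ⟨hi1, rfl⟩, if_pos ⟨by omega, by omega⟩, if_pos ⟨by omega, by omega⟩]
      · rw [if_neg (by tauto)]
        split_ifs <;> first | rfl | (exfalso; omega)
    · rw [if_neg (by tauto)]
      split_ifs <;> first | rfl | (exfalso; omega)

theorem getElem_eq_pvGet2 (st : List (List Int)) (i k : Nat) (hi : i < st.length)
    (hk : k < st[i].length) : st[i][k] = pvGet2 st i k := by
  unfold pvGet2
  rw [List.getD_eq_getElem _ _ hi, List.getD_eq_getElem _ _ hk]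

theorem cond_int_nat (i k : Nat) (n : Int) (h1 : 1 ≤ n) :
    ((i : Int) + 2 ^ k ≤ n) ↔ i + 2 ^ k ≤ n.toNat := by
  have hp : ((2 : Int) ^ k) = ((2 ^ k : Nat) : Int) := by push_cast; ring
  rw [hp]
  omega

theorem alt_slice_eq (arr : List Int) (i k : Nat) :
    (PySem.List.min? (PySem.List.slice arr (some (i : Int)) (some ((i : Int) + 2 ^ k)))
        (fun x => x)).getD 0 = wm arr i (2 ^ k) := by
  have : ((2 : Int) ^ k) = ((2 ^ k : Nat) : Int) := by push_cast; ring
  rw [this, PySem.List.slice_natCast_add, min?_id_getD]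
  rfl

-- ===== VERDICT (by name: the statement is the Claim_ definition above) =====
theorem build_sparse_table_spec : Claim_equal_build_sparse_table := by
  intro arr n _ hpre
  obtain ⟨h1, h2⟩ := hpre
  have hlen : n.toNat ≤ arr.length := by omega
  unfold Spec_build_sparse_table
  have ha : build_sparse_table arr n =
      ((List.range (Nat.log2 n.toNat)).foldl (fun st j1 =>
        (List.range (n.toNat + 1 - 2 ^ (j1 + 1))).foldl (fun st i =>
          pvSet2 st i (j1 + 1) (min (pvGet2 st i j1) (pvGet2 st (i + 2 ^ j1) j1))) st)
        ((List.range n.toNat).foldl (fun st i => pvSet2 st i 0 (arr.getD i 0))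
          ((List.range n.toNat).map (fun _ => List.replicate (Nat.log2 n.toNat + 1) (0 : Int)))),
       ((Nat.log2 n.toNat + 1 : Nat) : Int)) := rfl
  have hb : build_sparse_table_alt arr n =
      ((List.range n.toNat).map (fun (i : Nat) => (List.range (Nat.log2 n.toNat + 1)).map (fun (j : Nat) =>
          if (i : Int) + 2 ^ j ≤ n then
            ((PySem.List.min? (PySem.List.slice arr (some (i : Int)) (some ((i : Int) + 2 ^ j)))
              (fun x => x)).getD 0)
          else 0)),
       ((Nat.log2 n.toNat + 1 : Nat) : Int)) := rfl
  rw [ha, hb, Prod.mk.injEq]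
  refine ⟨?_, rfl⟩
  have hInv0 : pvInv arr n.toNat (Nat.log2 n.toNat + 1) 0
      ((List.range n.toNat).foldl (fun st i => pvSet2 st i 0 (arr.getD i 0))
        ((List.range n.toNat).map (fun _ => List.replicate (Nat.log2 n.toNat + 1) (0 : Int)))) := by
    obtain ⟨L, R, E⟩ := base_inv arr n.toNat (Nat.log2 n.toNat + 1) hlen n.toNat (le_refl _)
    refine ⟨L, R, fun i k => ?_⟩
    rw [E i k]
    unfold Etab
    by_cases hk : k = 0
    · subst hk
      simp only [pow_zero, le_refl, true_and]
      split_ifs <;> first | rfl | (exfalso; omega)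
    · split_ifs <;> first | rfl | (exfalso; omega)
  obtain ⟨L, R, E⟩ := outer_inv arr n.toNat (Nat.log2 n.toNat + 1) _ hlen hInv0
    (Nat.log2 n.toNat) (by omega)
  apply List.ext_getElem
  · rw [L]
    simp
  · intro i hi1 hi2
    have hi : i < n.toNat := by have h := hi1; rw [L] at h; exact h
    apply List.ext_getElem
    · have hrow := R i
      rw [List.getD_eq_getElem _ _ hi1, if_pos hi] at hrow
      rw [hrow]
      simp
    · intro k hk1 hk2
      have hk : k < Nat.log2 n.toNat + 1 := by
        have hrow := R i
        rw [List.getD_eq_getElem _ _ hi1, if_pos hi] at hrow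
        rw [hrow] at hk1
        exact hk1
      rw [getElem_eq_pvGet2 _ _ _ hi1 hk1, E i k]
      unfold Etab
      simp only [List.getElem_map, List.getElem_range]
      rw [alt_slice_eq]
      simp only [cond_int_nat i k n h1]
      rw [if_pos ⟨hi, hk⟩]
      split_ifs <;> first | rfl | (exfalso; omega)
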